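-- pv_equiv track=rewrite | github.com/Neved4/oscp-notes | build/sort_tags.py | modify_tags
-- ===== SOURCE A (Python) =====
-- def modify_tags(tags):
-- 	priority = [
-- 		"ProvingGrounds", "TryHackMe", "HackTheBox",
-- 		"easy", "medium", "hard",
-- 		"insane", "linux", "windows",
-- 		"msof"
-- 	]
--
-- 	return sorted(set(tags),
-- 		key=lambda t: (not any(t.startswith(p) for p in priority), t))
-- ===== SOURCE B (Python) =====
-- def modify_tags(tags):
-- 	priority = [
-- 		"ProvingGrounds", "TryHackMe", "HackTheBox",
-- 		"easy", "medium", "hard",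
-- 		"insane", "linux", "windows",
-- 		"msof"
-- 	]
--
-- 	def is_priority(t):
-- 		return any(t.startswith(p) for p in priority)
--
-- 	uniq = set(tags)
-- 	pri = sorted(t for t in uniq if is_priority(t))
-- 	rest = sorted(t for t in uniq if not is_priority(t))
-- 	return pri + rest
-- ===== Notes on version B (the rewrite author's own statement) =====
-- stated objective: alternative
-- what changed: Replaces the single compound-key (not-priority, tag) sort with an explicit partition of the deduplicated tags into a priority bucket and a rest bucket, each sorted by plain string order and concatenated.
import Mathlib
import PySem

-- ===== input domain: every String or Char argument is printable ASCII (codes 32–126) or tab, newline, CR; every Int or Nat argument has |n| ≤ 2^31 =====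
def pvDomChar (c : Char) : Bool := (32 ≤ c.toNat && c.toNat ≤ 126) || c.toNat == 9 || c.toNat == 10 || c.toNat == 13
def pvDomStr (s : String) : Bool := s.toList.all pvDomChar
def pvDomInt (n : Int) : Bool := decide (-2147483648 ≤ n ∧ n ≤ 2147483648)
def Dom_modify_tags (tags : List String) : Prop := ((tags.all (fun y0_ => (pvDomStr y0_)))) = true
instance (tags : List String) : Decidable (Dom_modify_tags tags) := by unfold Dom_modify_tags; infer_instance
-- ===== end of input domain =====

-- B partitions the deduplicated tags into a priority bucket and a rest bucket and sorts each by
-- plain string order, instead of A's single compound-key sort (objective: alternative decomposition).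


-- ===== PORT A =====
def pvPriorityA : List String :=
  ["ProvingGrounds", "TryHackMe", "HackTheBox",
   "easy", "medium", "hard",
   "insane", "linux", "windows",
   "msof"]

-- sorted(set(tags), key=lambda t: (not any(t.startswith(p) for p in priority), t))
def modify_tags (tags : List String) : List String :=
  PySem.List.sorted2 (PySem.Set.ofList tags)
    (fun t => !(pvPriorityA.any (fun p => PySem.Str.startswith t p)))
    (fun t => t)

-- ===== PORT B =====
def pvPriorityB : List String :=
  ["ProvingGrounds", "TryHackMe", "HackTheBox",
   "easy", "medium", "hard",
   "insane", "linux", "windows",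
   "msof"]

def pvIsPriorityB (t : String) : Bool := pvPriorityB.any (fun p => PySem.Str.startswith t p)

def modify_tags_alt (tags : List String) : List String :=
  let uniq := PySem.Set.ofList tags
  PySem.List.sorted (uniq.filter (fun t => pvIsPriorityB t)) (fun t => t) false
    ++ PySem.List.sorted (uniq.filter (fun t => !pvIsPriorityB t)) (fun t => t) false

-- ===== PRECONDITION & SPEC =====
def Spec_modify_tags (tags : List String) (out : List String) : Prop := out = modify_tags_alt tags
instance (tags : List String) (out : List String) : Decidable (Spec_modify_tags tags out) := by unfold Spec_modify_tags; infer_instance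

-- ===== CLAIM (what is proved, stated in full; the proofs are below) =====
def Claim_equal_modify_tags : Prop := ∀ (tags : List String), Dom_modify_tags tags → Spec_modify_tags tags (modify_tags tags)

-- ===== LEMMAS AND PROOFS =====

-- the compound key (not priority, t), encoded as one string whose order is the tuple order
def pvKey (t : String) : String :=
  String.ofList ((if pvIsPriorityB t then '0' else '1') :: t.toList)

-- the lexicographic comparator of A's tuple key equals the comparator of the encoded key
theorem pv_before_eq (a b : String) :
    (decide ((!pvIsPriorityB a) < (!pvIsPriorityB b)) ||
      (!decide ((!pvIsPriorityB b) < (!pvIsPriorityB a)) && decide (a < b)))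
    = decide (pvKey a < pvKey b) := by
  by_cases ha : pvIsPriorityB a = true <;> by_cases hb : pvIsPriorityB b = true <;>
    simp [pvKey, ha, hb, List.cons_lt_cons_iff]

-- A's sorted2 is the plain sorted with the encoded key
theorem pv_sorted2_eq (xs : List String) :
    PySem.List.sorted2 xs
      (fun t => !(pvPriorityA.any (fun p => PySem.Str.startswith t p)))
      (fun t => t) false
    = PySem.List.sorted xs pvKey false := by
  rw [PySem.List.sorted_eq_foldl_insertBy]
  show List.foldl (fun acc x => PySem.List.insertBy _ x acc) [] xs = _
  have hfun : (fun (a b : String) =>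
      decide ((!pvIsPriorityB a) < (!pvIsPriorityB b)) ||
        (!decide ((!pvIsPriorityB b) < (!pvIsPriorityB a)) && decide (a < b)))
      = fun a b => decide (pvKey a < pvKey b) := by
    funext a b; exact pv_before_eq a b
  show List.foldl (fun acc x => PySem.List.insertBy
      (fun a b => decide ((!pvIsPriorityB a) < (!pvIsPriorityB b)) ||
        (!decide ((!pvIsPriorityB b) < (!pvIsPriorityB a)) && decide (a < b))) x acc) [] xs = _
  rw [hfun]

theorem pv_key_lt_of_lt {a b : String} (hab : a < b)
    (h : pvIsPriorityB a = pvIsPriorityB b) : pvKey a < pvKey b := by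
  rw [pvKey, pvKey, h, String.lt_iff_toList_lt]
  simp
  exact String.lt_iff_toList_lt.mp hab

theorem pv_key_lt_cross {a b : String} (ha : pvIsPriorityB a = true)
    (hb : pvIsPriorityB b = false) : pvKey a < pvKey b := by
  rw [pvKey, pvKey, ha, hb, String.lt_iff_toList_lt]
  simp only [String.toList_ofList]
  exact List.Lex.rel (by decide)

-- a sorted bucket of distinct strings is strictly increasing
theorem pv_bucket_pairwise (l : List String) (hn : l.Nodup) (p : String → Bool) :
    (PySem.List.sorted (l.filter p) (fun t => t) false).Pairwise (· < ·) := by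
  have hperm := PySem.List.sorted_perm (l.filter p) (fun t => t) false
  have hle := PySem.List.sorted_pairwise (l.filter p) (fun t => t)
  have hnd : (PySem.List.sorted (l.filter p) (fun t => t) false).Nodup :=
    hperm.nodup_iff.mpr (hn.filter p)
  exact (hle.and hnd).imp (fun h => lt_of_le_of_ne h.1 h.2)

theorem pv_main (tags : List String) : modify_tags tags = modify_tags_alt tags := by
  unfold modify_tags modify_tags_alt
  rw [pv_sorted2_eq]
  set s := PySem.Set.ofList tags with hs
  have hnd : s.Nodup := PySem.Set.nodup_ofList tags
  apply PySem.List.sorted_eq_of_perm_of_pairwise_lt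
  · -- permutation
    refine ((PySem.List.sorted_perm _ _ _).append (PySem.List.sorted_perm _ _ _)).trans ?_
    have := List.filter_append_perm (fun t => pvIsPriorityB t) s
    simpa using this
  · -- strictly increasing under pvKey
    rw [List.pairwise_append]
    refine ⟨?_, ?_, ?_⟩
    · refine (pv_bucket_pairwise s hnd _).imp_of_mem (fun {a b} hma hmb h => ?_)
      rw [PySem.List.mem_sorted] at hma hmb
      exact pv_key_lt_of_lt h (((List.mem_filter.mp hma).2).trans
        ((List.mem_filter.mp hmb).2).symm)
    · refine (pv_bucket_pairwise s hnd _).imp_of_mem (fun {a b} hma hmb h => ?_)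
      rw [PySem.List.mem_sorted] at hma hmb
      have ha := (List.mem_filter.mp hma).2
      have hb := (List.mem_filter.mp hmb).2
      simp only [Bool.not_eq_eq_eq_not, Bool.not_true] at ha hb
      exact pv_key_lt_of_lt h (ha.trans hb.symm)
    · intro a hma b hmb
      rw [PySem.List.mem_sorted] at hma hmb
      have ha := (List.mem_filter.mp hma).2
      have hb := (List.mem_filter.mp hmb).2
      simp only [Bool.not_eq_eq_eq_not, Bool.not_true] at hb
      exact pv_key_lt_cross ha hb

-- ===== VERDICT (by name: the statement is the Claim_ definition above) =====
theorem modify_tags_spec : Claim_equal_modify_tags := by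
  intro tags _
  unfold Spec_modify_tags
  exact pv_main tags
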